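-- pv_equiv track=rewrite | github.com/colesprou/GetAction-Chrome-Ext | backend/app/odds/optic_client.py | _batch_books_for_moneyline
-- ===== SOURCE A (Python) =====
-- KALSHI_BOOK = "Kalshi"
--
-- def _batch_books_for_moneyline(sharp_books: list[str]) -> list[list[str]]:
--     """Split sharp book list into batches of <=4, always putting Kalshi in batch 0."""
--     books = [b for b in sharp_books if b and b.lower() != "kalshi"]
--     if not books:
--         return [[KALSHI_BOOK]]
--     first = books[:3] + [KALSHI_BOOK]
--     batches = [first]
--     rest = books[3:]
--     for i in range(0, len(rest), 4):
--         batches.append(rest[i : i + 4])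
--     return batches
-- ===== SOURCE B (Python) =====
-- KALSHI_BOOK = "Kalshi"
--
-- def _batch_books_for_moneyline(sharp_books: list[str]) -> list[list[str]]:
--     """Single streaming pass: an online batcher that fills the current batch book
--     by book, slips Kalshi in as the fourth slot of the first batch, and flushes a
--     batch whenever it reaches four elements; no slicing or index arithmetic."""
--     batches = []
--     cur = []
--     kalshi_placed = False
--     for b in sharp_books:
--         if not b or b.lower() == "kalshi":
--             continue
--         cur.append(b)
--         if not kalshi_placed and len(cur) == 3:
--             cur.append(KALSHI_BOOK)
--             kalshi_placed = True
--         if len(cur) == 4: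
--             batches.append(cur)
--             cur = []
--     if not kalshi_placed:
--         cur.append(KALSHI_BOOK)
--     if cur:
--         batches.append(cur)
--     return batches
-- ===== Notes on version B (the rewrite author's own statement) =====
-- stated objective: alternative
-- what changed: A builds the first batch by slicing (books[:3]+[Kalshi]) and then chunks the remainder with an index loop over range(0,len,4); B is an online single-pass batcher with an accumulator: it fuses the filter into the loop, appends each book to the current batch, slips Kalshi in as the fourth slot of the first batch, and flushes whenever a batch reaches four -- no slices or index arithmetic at all.
import Mathlib
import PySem

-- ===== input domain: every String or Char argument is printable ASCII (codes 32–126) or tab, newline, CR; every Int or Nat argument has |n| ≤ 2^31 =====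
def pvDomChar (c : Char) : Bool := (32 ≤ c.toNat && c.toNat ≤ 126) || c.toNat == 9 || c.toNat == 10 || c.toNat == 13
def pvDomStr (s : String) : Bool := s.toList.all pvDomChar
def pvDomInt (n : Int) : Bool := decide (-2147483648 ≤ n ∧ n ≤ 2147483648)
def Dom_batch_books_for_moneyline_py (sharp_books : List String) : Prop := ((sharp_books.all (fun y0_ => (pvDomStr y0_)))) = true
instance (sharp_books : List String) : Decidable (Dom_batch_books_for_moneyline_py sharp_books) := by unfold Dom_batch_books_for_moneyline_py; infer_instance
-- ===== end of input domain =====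

-- B replaces A's slice-built first batch and index loop over range(0,len,4) by an
-- online single-pass batcher: filter fused into the loop, an accumulator batch that
-- flushes at four, Kalshi slipped in as the fourth slot of the first batch
-- (objective: alternative; same O(n) cost).

-- shared filter predicate of both Pythons ("b and b.lower() != 'kalshi'")
def pvKeep (b : String) : Bool := !(b == "") && !(PySem.Str.lower b == "kalshi")

-- ===== PORT A =====
def batch_books_for_moneyline_py (sharp_books : List String) : List (List String) :=
  let books := sharp_books.filter pvKeep
  if books = [] then [["Kalshi"]]
  else
    let first := PySem.List.slice books none (some 3) ++ ["Kalshi"]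
    let rest := PySem.List.slice books (some 3) none
    (PySem.List.pyRange 0 (PySem.List.len rest) 4).foldl
      (fun batches i => batches ++ [PySem.List.slice rest (some i) (some (i + 4))]) [first]

-- ===== PORT B =====
-- one loop-body step of Source B: skip filtered books, grow cur, slip Kalshi in at 3, flush at 4
def bStep (st : List (List String) × List String × Bool) (b : String) :
    List (List String) × List String × Bool :=
  let cur1 := st.2.1 ++ [b]
  let cur2 := if !st.2.2 && cur1.length == 3 then cur1 ++ ["Kalshi"] else cur1
  let placed2 := if !st.2.2 && cur1.length == 3 then true else st.2.2
  if cur2.length == 4 then (st.1 ++ [cur2], [], placed2) else (st.1, cur2, placed2)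

def bAltStep (st : List (List String) × List String × Bool) (b : String) :
    List (List String) × List String × Bool :=
  if pvKeep b then bStep st b else st

-- the code after the loop in Source B
def bFin (st : List (List String) × List String × Bool) : List (List String) :=
  let cur := if !st.2.2 then st.2.1 ++ ["Kalshi"] else st.2.1
  if cur = [] then st.1 else st.1 ++ [cur]

def batch_books_for_moneyline_py_alt (sharp_books : List String) : List (List String) :=
  bFin (sharp_books.foldl bAltStep ([], [], false))

-- ===== PRECONDITION & SPEC =====
def Spec_batch_books_for_moneyline_py (sharp_books : List String) (out : List (List String)) : Prop := out = batch_books_for_moneyline_py_alt sharp_books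
instance (sharp_books : List String) (out : List (List String)) : Decidable (Spec_batch_books_for_moneyline_py sharp_books out) := by unfold Spec_batch_books_for_moneyline_py; infer_instance

-- ===== CLAIM (what is proved, stated in full; the proofs are below) =====
def Claim_equal_batch_books_for_moneyline_py : Prop := ∀ (sharp_books : List String), Dom_batch_books_for_moneyline_py sharp_books → Spec_batch_books_for_moneyline_py sharp_books (batch_books_for_moneyline_py sharp_books)

-- ===== LEMMAS AND PROOFS =====

-- reference chunking: split a list into consecutive blocks of 4
def chunk4 {α : Type} : List α → List (List α)
  | [] => []
  | x :: xs => ((x :: xs).take 4) :: chunk4 ((x :: xs).drop 4)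
termination_by l => l.length
decreasing_by simp

theorem chunk4_ne_nil {α : Type} (xs : List α) (h : xs ≠ []) :
    chunk4 xs = xs.take 4 :: chunk4 (xs.drop 4) := by
  cases xs with
  | nil => exact absurd rfl h
  | cons x t => rw [chunk4.eq_def]

theorem chunk4_nil {α : Type} : chunk4 ([] : List α) = [] := by rw [chunk4.eq_def]

theorem chunk4_small {α : Type} (xs : List α) (h0 : xs ≠ []) (h4 : xs.length ≤ 4) :
    chunk4 xs = [xs] := by
  rw [chunk4_ne_nil _ h0, List.take_of_length_le h4, List.drop_eq_nil_of_le h4, chunk4_nil]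

theorem chunk4_append_of_len4 {α : Type} (f r : List α) (h : f.length = 4) :
    chunk4 (f ++ r) = f :: chunk4 r := by
  have hne : f ++ r ≠ [] := by
    intro hc
    have := congrArg List.length hc
    simp [h] at this
  rw [chunk4_ne_nil _ hne, ← h, List.take_left, List.drop_left]

theorem pyRange4_nonpos (n : Int) (h : n ≤ 0) : PySem.List.pyRange 0 n 4 = [] := by
  rw [PySem.List.pyRange_of_pos _ _ (by norm_num)]
  rw [if_neg (by omega)]
  simp

theorem pyRange4_pos (n : Int) (h : 0 < n) :
    PySem.List.pyRange 0 n 4 = 0 :: (PySem.List.pyRange 0 (n - 4) 4).map (· + 4) := by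
  rw [PySem.List.pyRange_of_pos _ _ (by norm_num : (0:Int) < 4),
      PySem.List.pyRange_of_pos _ _ (by norm_num : (0:Int) < 4)]
  have hc : (if (0:Int) < n then ((n - 0 + 4 - 1) / 4).toNat else 0)
      = (if (0:Int) < n - 4 then ((n - 4 - 0 + 4 - 1) / 4).toNat else 0) + 1 := by
    split_ifs <;> omega
  rw [hc, List.range_succ_eq_map, List.map_cons, List.map_map, List.map_map]
  refine List.cons_eq_cons.2 ⟨by norm_num, ?_⟩
  apply List.map_congr_left
  intro k _
  simp [Nat.succ_eq_add_one]
  ring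

theorem map_slice_chunk4 {α : Type} (xs : List α) :
    (PySem.List.pyRange 0 (PySem.List.len xs) 4).map
      (fun i => PySem.List.slice xs (some i) (some (i + 4))) = chunk4 xs := by
  cases hxs : xs with
  | nil => simp [pyRange4_nonpos 0 le_rfl, chunk4_nil]
  | cons x t =>
    rw [← hxs]
    have hne : xs ≠ [] := by simp [hxs]
    have hpos : (0:Int) < PySem.List.len xs := by
      simp [PySem.List.len_eq, hxs]
    rw [pyRange4_pos _ hpos, List.map_cons, List.map_map, chunk4_ne_nil xs hne]
    refine List.cons_eq_cons.2 ⟨?_, ?_⟩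
    · rw [PySem.List.slice_toNat xs (by norm_num) (by norm_num)]
      norm_num
      omega
    · have hmain : ∀ n : Int, n = PySem.List.len xs →
          (PySem.List.pyRange 0 (n - 4) 4).map
            ((fun i => PySem.List.slice xs (some i) (some (i + 4))) ∘ (· + 4))
          = (PySem.List.pyRange 0 (PySem.List.len (xs.drop 4)) 4).map
            (fun i => PySem.List.slice (xs.drop 4) (some i) (some (i + 4))) := by
        intro n hn
        by_cases h4 : 4 ≤ xs.length
        · have hlen : n - 4 = PySem.List.len (xs.drop 4) := by
            simp [PySem.List.len_eq] at hn ⊢; omega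
          rw [hlen]
          apply List.map_congr_left
          intro i hi
          have hi0 : 0 ≤ i := by
            rcases (PySem.List.mem_pyRange_iff_of_pos (by norm_num) i).1 hi with ⟨h1, _, _⟩
            exact h1
          simp only [Function.comp]
          rw [PySem.List.slice_toNat xs (by omega) (by omega),
              PySem.List.slice_toNat (xs.drop 4) hi0 (by omega)]
          rw [List.drop_drop]
          have e1 : ((i + 4) + 4).toNat - (i + 4).toNat = (i + 4).toNat - i.toNat := by omega
          have e2 : (i + 4).toNat = i.toNat + 4 := by omega
          rw [e1, e2, Nat.add_comm 4 i.toNat]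
        · have h1 : n - 4 ≤ 0 := by simp [PySem.List.len_eq] at hn; omega
          have h2 : PySem.List.len (xs.drop 4) ≤ 0 := by
            simp [PySem.List.len_eq]; omega
          rw [pyRange4_nonpos _ h1, pyRange4_nonpos _ h2]
          simp
      rw [hmain _ rfl]
      exact map_slice_chunk4 (xs.drop 4)
termination_by xs.length
decreasing_by simp [hxs]

-- A's value is the chunk-by-4 of the filtered list with Kalshi inserted at index 3
theorem aChar (sharp_books : List String) :
    batch_books_for_moneyline_py sharp_books =
      chunk4 ((sharp_books.filter pvKeep).take 3 ++ ["Kalshi"] ++ (sharp_books.filter pvKeep).drop 3) := by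
  unfold batch_books_for_moneyline_py
  set books := sharp_books.filter pvKeep with hbooks
  simp only []
  by_cases hb : books = []
  · rw [if_pos hb, hb]
    simp [chunk4_small ["Kalshi"] (by simp) (by simp)]
  · rw [if_neg hb]
    rw [PySem.List.foldl_append_singleton_eq_map
      (fun i => PySem.List.slice (PySem.List.slice books (some 3) none) (some i) (some (i + 4)))]
    rw [map_slice_chunk4]
    rw [PySem.List.slice_to books (by norm_num), PySem.List.slice_from books (by norm_num)]
    rw [show ((3:Int).toNat) = 3 from rfl]
    by_cases h3 : 3 ≤ books.length
    · rw [chunk4_append_of_len4 (books.take 3 ++ ["Kalshi"]) (books.drop 3) (by simp; omega)]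
      simp
    · have ht : books.take 3 = books := List.take_of_length_le (by omega)
      have hd : books.drop 3 = [] := List.drop_eq_nil_of_le (by omega)
      rw [ht, hd, List.append_nil, chunk4_nil]
      rw [chunk4_small (books ++ ["Kalshi"]) (by simp) (by simp; omega)]
      simp

-- fold over the input with the skip branch = fold over the filtered list without it
theorem foldl_filter_fuse (xs : List String) (st : List (List String) × List String × Bool) :
    xs.foldl bAltStep st = (xs.filter pvKeep).foldl bStep st := by
  induction xs generalizing st with
  | nil => rfl
  | cons x t ih =>
    by_cases h : pvKeep x = true
    · simp [h, bAltStep, ih]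
    · simp [h, bAltStep, ih]

-- once Kalshi has been placed the batcher just chunks the remaining stream by 4
theorem phase2 (bs : List String) : ∀ (batches : List (List String)) (cur : List String),
    cur.length < 4 →
    bFin (bs.foldl bStep (batches, cur, true)) = batches ++ chunk4 (cur ++ bs) := by
  induction bs with
  | nil =>
    intro batches cur h
    simp only [List.foldl_nil, bFin, List.append_nil, Bool.not_true, Bool.false_eq_true,
      if_false]
    by_cases hc : cur = []
    · simp [hc, chunk4_nil]
    · rw [if_neg hc, chunk4_small cur hc (by omega)]
  | cons b t ih =>
    intro batches cur h
    simp only [List.foldl_cons, bStep, Bool.not_true, Bool.false_and, Bool.false_eq_true,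
      if_false]
    by_cases h3 : cur.length = 3
    · rw [if_pos (by simp [h3])]
      rw [ih _ [] (by simp)]
      rw [show cur ++ b :: t = (cur ++ [b]) ++ t by simp]
      rw [chunk4_append_of_len4 (cur ++ [b]) t (by simp [h3])]
      simp
    · rw [if_neg (by simp; omega)]
      rw [ih _ (cur ++ [b]) (by simp; omega)]
      simp

-- B's value is the same chunk-by-4 of the filtered list with Kalshi inserted at index 3
theorem bChar (bs : List String) :
    bFin (bs.foldl bStep ([], [], false)) = chunk4 (bs.take 3 ++ ["Kalshi"] ++ bs.drop 3) := by
  match bs with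
  | [] =>
    simp only [List.foldl_nil, bFin, List.take_nil, List.drop_nil, List.nil_append,
      List.append_nil, Bool.not_false, if_true]
    rw [chunk4_small ["Kalshi"] (by simp) (by simp)]
    simp
  | [b1] =>
    simp only [List.foldl_cons, List.foldl_nil, bStep, bFin]
    norm_num
    rw [chunk4_small [b1, "Kalshi"] (by simp) (by simp)]
    simp
  | [b1, b2] =>
    simp only [List.foldl_cons, List.foldl_nil, bStep, bFin]
    norm_num
    rw [chunk4_small [b1, b2, "Kalshi"] (by simp) (by simp)]
    simp
  | b1 :: b2 :: b3 :: rest =>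
    have hstep : ([b1, b2, b3].foldl bStep (([] : List (List String)), ([] : List String), false))
        = ([[b1, b2, b3, "Kalshi"]], [], true) := by
      simp [bStep]
    have : (b1 :: b2 :: b3 :: rest).foldl bStep (([] : List (List String)), ([] : List String), false)
        = rest.foldl bStep ([[b1, b2, b3, "Kalshi"]], [], true) := by
      rw [show b1 :: b2 :: b3 :: rest = [b1, b2, b3] ++ rest by simp, List.foldl_append, hstep]
    rw [this, phase2 rest _ [] (by simp)]
    have hr : (b1 :: b2 :: b3 :: rest).take 3 ++ ["Kalshi"] ++ (b1 :: b2 :: b3 :: rest).drop 3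
        = [b1, b2, b3, "Kalshi"] ++ rest := by simp
    rw [hr, chunk4_append_of_len4 [b1, b2, b3, "Kalshi"] rest (by simp)]
    simp

-- ===== VERDICT (by name: the statement is the Claim_ definition above) =====
theorem batch_books_for_moneyline_py_spec : Claim_equal_batch_books_for_moneyline_py := by
  intro sharp_books _
  show batch_books_for_moneyline_py sharp_books = batch_books_for_moneyline_py_alt sharp_books
  rw [aChar, batch_books_for_moneyline_py_alt, foldl_filter_fuse, bChar]
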